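-- pv_equiv track=rewrite | github.com/guyi2000/structureclaw | backend/src/agent-skills/analysis/yjk-static/yjk_converter.py | _infer_section_roles
-- ===== SOURCE A (Python) =====
-- def _infer_section_roles(data: dict) -> dict[str, str]:
--     """Build {section_id: "column"|"beam"} by scanning element types."""
--     roles: dict[str, str] = {}
--     for elem in data.get("elements", []):
--         sec_id = elem.get("section", "")
--         etype = elem.get("type", "beam")
--         if etype == "column" and roles.get(sec_id) != "column":
--             roles[sec_id] = "column"
--         elif sec_id not in roles:
--             roles[sec_id] = "beam"
--     return roles
-- ===== SOURCE B (Python) =====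
-- def _infer_section_roles(data: dict) -> dict[str, str]:
--     """Build {section_id: "column"|"beam"} by scanning element types."""
--     elements = data.get("elements", [])
--     columns = {e.get("section", "") for e in elements if e.get("type", "beam") == "column"}
--     roles: dict[str, str] = {}
--     for e in elements:
--         sid = e.get("section", "")
--         roles[sid] = "column" if sid in columns else "beam"
--     return roles
-- ===== Notes on version B (the rewrite author's own statement) =====
-- stated objective: simpler
-- what changed: Replaced the single stateful pass with conditional upgrade/skip logic by a two-pass index-then-map decomposition: first collect the set of sections used by any column element, then assign each section's role by a plain set-membership lookup.
import Mathlib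
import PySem

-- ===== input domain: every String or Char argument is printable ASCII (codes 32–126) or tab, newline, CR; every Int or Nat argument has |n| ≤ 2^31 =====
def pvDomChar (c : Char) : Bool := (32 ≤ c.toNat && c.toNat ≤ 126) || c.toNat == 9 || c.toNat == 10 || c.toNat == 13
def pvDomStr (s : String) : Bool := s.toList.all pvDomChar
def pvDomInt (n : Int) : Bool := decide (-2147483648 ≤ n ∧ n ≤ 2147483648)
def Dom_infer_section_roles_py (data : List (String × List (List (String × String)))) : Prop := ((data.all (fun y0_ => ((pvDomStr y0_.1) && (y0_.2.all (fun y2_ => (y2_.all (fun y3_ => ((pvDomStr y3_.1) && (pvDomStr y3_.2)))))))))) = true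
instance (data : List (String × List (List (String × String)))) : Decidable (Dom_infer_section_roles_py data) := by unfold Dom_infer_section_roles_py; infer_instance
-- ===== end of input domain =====

-- B replaces A's single stateful pass (conditional upgrade/skip) by a two-pass
-- index-then-map decomposition: collect the set of column sections, then assign
-- each role by membership — objective: simpler.

-- ===== PORT A =====
def infer_section_roles_py (data : List (String × List (List (String × String)))) : List (String × String) :=
  let elems := (PySem.Dict.mk data).getD "elements" []
  (elems.foldl (fun (roles : PySem.Dict String String) elem =>
      let sec_id := (PySem.Dict.mk elem).getD "section" ""
      let etype := (PySem.Dict.mk elem).getD "type" "beam"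
      if etype == "column" && !(roles.get? sec_id == some "column") then
        roles.insert sec_id "column"
      else if !(roles.contains sec_id) then
        roles.insert sec_id "beam"
      else roles)
    (PySem.Dict.mk [])).items

-- ===== PORT B =====
def infer_section_roles_py_alt (data : List (String × List (List (String × String)))) : List (String × String) :=
  let elems := (PySem.Dict.mk data).getD "elements" []
  let columns : PySem.Set String := elems.foldl (fun (s : PySem.Set String) e =>
      if (PySem.Dict.mk e).getD "type" "beam" == "column" then
        s.add ((PySem.Dict.mk e).getD "section" "")
      else s) PySem.Set.empty
  (elems.foldl (fun (roles : PySem.Dict String String) e =>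
      let sid := (PySem.Dict.mk e).getD "section" ""
      roles.insert sid (if columns.contains sid then "column" else "beam"))
    (PySem.Dict.mk [])).items

-- ===== PRECONDITION & SPEC =====
def Spec_infer_section_roles_py (data : List (String × List (List (String × String)))) (out : List (String × String)) : Prop := out = infer_section_roles_py_alt data
instance (data : List (String × List (List (String × String)))) (out : List (String × String)) : Decidable (Spec_infer_section_roles_py data out) := by unfold Spec_infer_section_roles_py; infer_instance

-- ===== CLAIM (what is proved, stated in full; the proofs are below) =====
def Claim_equal_infer_section_roles_py : Prop := ∀ (data : List (String × List (List (String × String)))), Dom_infer_section_roles_py data → Spec_infer_section_roles_py data (infer_section_roles_py data)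

-- ===== LEMMAS AND PROOFS =====

-- named versions of the fold bodies of the two ports (definitionally equal to them)
def pvSec (e : List (String × String)) : String := (PySem.Dict.mk e).getD "section" ""
def pvTy (e : List (String × String)) : String := (PySem.Dict.mk e).getD "type" "beam"

def pvStepA (roles : PySem.Dict String String) (elem : List (String × String)) : PySem.Dict String String :=
  if pvTy elem == "column" && !(roles.get? (pvSec elem) == some "column") then
    roles.insert (pvSec elem) "column"
  else if !(roles.contains (pvSec elem)) then
    roles.insert (pvSec elem) "beam"
  else roles

def pvStepB (C : PySem.Set String) (roles : PySem.Dict String String) (e : List (String × String)) : PySem.Dict String String :=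
  roles.insert (pvSec e) (if C.contains (pvSec e) then "column" else "beam")

def pvStepC (s : PySem.Set String) (e : List (String × String)) : PySem.Set String :=
  if pvTy e == "column" then s.add (pvSec e) else s

-- "some element of es is a column with section k"
def pvColIn (es : List (List (String × String))) (k : String) : Prop :=
  ∃ e ∈ es, pvTy e = "column" ∧ pvSec e = k

lemma pvColIn_nil (k : String) : ¬ pvColIn [] k := by simp [pvColIn]

lemma pvColIn_cons (e : List (String × String)) (rest : List (List (String × String))) (k : String) :
    pvColIn (e :: rest) k ↔ (pvTy e = "column" ∧ pvSec e = k) ∨ pvColIn rest k := by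
  constructor
  · rintro ⟨e', he', hP⟩
    rcases List.mem_cons.1 he' with rfl | h
    · exact Or.inl hP
    · exact Or.inr ⟨e', h, hP⟩
  · rintro (hP | ⟨e', h, hP⟩)
    · exact ⟨e, List.mem_cons_self, hP⟩
    · exact ⟨e', List.mem_cons.2 (Or.inr h), hP⟩

-- B's intermediate dictionary, as a function of A's: same keys, value forced to
-- "column" on sections the global column set contains
def pvMapC (C : PySem.Set String) (d : PySem.Dict String String) : PySem.Dict String String :=
  PySem.Dict.mk (d.items.map (fun p => (p.1, if C.contains p.1 then "column" else p.2)))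

lemma contains_mapC (C : PySem.Set String) (d : PySem.Dict String String) (k : String) :
    (pvMapC C d).contains k = d.contains k := by
  show (d.items.map (fun p => (p.1, if C.contains p.1 then "column" else p.2))).any (fun p => p.1 == k)
      = d.items.any (fun p => p.1 == k)
  rw [List.any_map]
  rfl

lemma keys_mapC (C : PySem.Set String) (d : PySem.Dict String String) :
    (pvMapC C d).keys = d.keys := by
  show (d.items.map (fun p => (p.1, if C.contains p.1 then "column" else p.2))).map Prod.fst
      = d.items.map Prod.fst
  rw [List.map_map]
  rfl

lemma get?_mapC (C : PySem.Set String) (d : PySem.Dict String String) (k : String) :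
    (pvMapC C d).get? k = (d.get? k).map (fun v => if C.contains k then "column" else v) := by
  rcases d with ⟨items⟩
  induction items with
  | nil => rfl
  | cons p rest ih =>
    by_cases h : p.1 = k
    · simp [pvMapC, PySem.Dict.get?, h]
    · have hb : (p.1 == k) = false := by simp [h]
      simpa [pvMapC, PySem.Dict.get?, hb] using ih

lemma insert_mapC (C : PySem.Set String) (d : PySem.Dict String String) (k : String) (v : String) :
    pvMapC C (d.insert k v) = (pvMapC C d).insert k (if C.contains k then "column" else v) := by
  by_cases h : d.contains k = true
  · have h' : (pvMapC C d).contains k = true := by rw [contains_mapC]; exact h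
    apply PySem.Dict.ext
    rw [show (pvMapC C (d.insert k v)).items = (d.insert k v).items.map (fun p => (p.1, if C.contains p.1 then "column" else p.2)) from rfl]
    rw [PySem.Dict.items_insert, PySem.Dict.items_insert, if_pos h, if_pos h',
        show (pvMapC C d).items = d.items.map (fun p => (p.1, if C.contains p.1 then "column" else p.2)) from rfl,
        List.map_map, List.map_map]
    apply List.map_congr_left
    intro p _
    by_cases hp : p.1 = k
    · simp [Function.comp, hp]
    · simp [Function.comp, hp]
  · have h' : ¬ (pvMapC C d).contains k = true := by rw [contains_mapC]; exact h
    apply PySem.Dict.ext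
    rw [show (pvMapC C (d.insert k v)).items = (d.insert k v).items.map (fun p => (p.1, if C.contains p.1 then "column" else p.2)) from rfl]
    rw [PySem.Dict.items_insert, PySem.Dict.items_insert, if_neg h, if_neg h', List.map_append]
    rfl

-- inserting a key with the value it already has is a no-op (keys unique)
lemma insert_eq_self_of_get? (d : PySem.Dict String String) (k : String) (v : String)
    (hnd : d.keys.Nodup) (h : d.get? k = some v) : d.insert k v = d := by
  have hc : d.contains k = true := by rw [PySem.Dict.contains_eq_isSome_get?, h]; rfl
  apply PySem.Dict.ext
  rw [PySem.Dict.items_insert, if_pos hc]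
  have hmap : ∀ p ∈ d.items, (if (p.1 == k) = true then (k, v) else p) = p := by
    intro p hp
    by_cases hpk : p.1 = k
    · have h2 : d.get? p.1 = some p.2 := PySem.Dict.get?_of_mem_items d (by exact hp) hnd
      rw [hpk, h] at h2
      have hv : v = p.2 := Option.some.inj h2
      rw [if_pos (by simp [hpk]), ← hpk, hv]
    · rw [if_neg (by simp [hpk])]
  rw [List.map_congr_left hmap]
  exact List.map_id _

lemma pv_cols (k : String) : ∀ (es : List (List (String × String))) (s : PySem.Set String),
    ((es.foldl pvStepC s).contains k = true) ↔ (s.contains k = true ∨ pvColIn es k) := by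
  intro es
  induction es with
  | nil => intro s; simp [pvColIn]
  | cons e rest ih =>
    intro s
    rw [List.foldl_cons]
    by_cases het : pvTy e = "column"
    · rw [show pvStepC s e = s.add (pvSec e) from by simp [pvStepC, het]]
      rw [ih, pvColIn_cons]
      have hadd : ((s.add (pvSec e)).contains k = true) ↔ (s.contains k = true ∨ k = pvSec e) := by
        constructor
        · intro h
          rcases (PySem.Set.mem_add s (pvSec e) k).1 (by simpa [PySem.Set.contains] using h) with h1 | h1
          · exact Or.inl (by simpa [PySem.Set.contains] using h1)
          · exact Or.inr h1
        · intro h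
          have : k ∈ s.add (pvSec e) := (PySem.Set.mem_add s (pvSec e) k).2 (by
            rcases h with h1 | h1
            · exact Or.inl (by simpa [PySem.Set.contains] using h1)
            · exact Or.inr h1)
          simpa [PySem.Set.contains] using this
      rw [hadd]
      constructor
      · rintro ((h | h) | h)
        · exact Or.inl h
        · exact Or.inr (Or.inl ⟨het, h.symm⟩)
        · exact Or.inr (Or.inr h)
      · rintro (h | ⟨⟨_, h⟩ | h⟩)
        · exact Or.inl (Or.inl h)
        · exact Or.inl (Or.inr h.symm)
        · exact Or.inr h
    · rw [show pvStepC s e = s from by simp [pvStepC, het]]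
      rw [ih, pvColIn_cons]
      have : ¬ (pvTy e = "column" ∧ pvSec e = k) := fun hx => het hx.1
      tauto

-- Main invariant: with C the global column-section set, B's running dictionary is
-- pvMapC C of A's, provided C holds exactly the sections with a column ahead or
-- already recorded as "column".
lemma pv_main (C : PySem.Set String) :
    ∀ (es : List (List (String × String))) (rA : PySem.Dict String String),
      rA.keys.Nodup →
      (∀ p ∈ rA.items, p.2 = "column" ∨ p.2 = "beam") →
      (∀ k : String, C.contains k = true ↔ (pvColIn es k ∨ rA.get? k = some "column")) →
      es.foldl pvStepA rA = es.foldl (pvStepB C) (pvMapC C rA) := by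
  intro es
  induction es with
  | nil =>
    intro rA hnd hval hC
    simp only [List.foldl_nil]
    apply PySem.Dict.ext
    rw [show (pvMapC C rA).items = rA.items.map (fun p => (p.1, if C.contains p.1 then "column" else p.2)) from rfl]
    have hmap : ∀ p ∈ rA.items, ((p.1, if C.contains p.1 then "column" else p.2) : String × String) = p := by
      intro p hp
      by_cases h : C.contains p.1 = true
      · rcases (hC p.1).1 h with h1 | h1
        · exact absurd h1 (pvColIn_nil p.1)
        · have h2 : rA.get? p.1 = some p.2 := PySem.Dict.get?_of_mem_items rA (by exact hp) hnd
          have hv : p.2 = "column" := Option.some.inj (h2.symm.trans h1)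
          rw [if_pos h, ← hv]
      · rw [if_neg h]
    rw [List.map_congr_left hmap]
    exact (List.map_id _).symm
  | cons e rest ih =>
    intro rA hnd hval hC
    simp only [List.foldl_cons]
    by_cases het : pvTy e = "column"
    · by_cases hg : rA.get? (pvSec e) = some "column"
      · -- column already recorded: A is a no-op, B re-inserts the same value
        have hCsec : C.contains (pvSec e) = true := (hC (pvSec e)).2 (Or.inr hg)
        have hcont : rA.contains (pvSec e) = true := by
          rw [PySem.Dict.contains_eq_isSome_get?, hg]; rfl
        have hstepA : pvStepA rA e = rA := by simp [pvStepA, het, hg, hcont]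
        have hgB : (pvMapC C rA).get? (pvSec e) = some "column" := by
          rw [get?_mapC, hg, Option.map_some, if_pos hCsec]
        have hndB : (pvMapC C rA).keys.Nodup := by rw [keys_mapC]; exact hnd
        have hstepB : pvStepB C (pvMapC C rA) e = pvMapC C rA := by
          rw [pvStepB, if_pos hCsec]
          exact insert_eq_self_of_get? _ _ _ hndB hgB
        rw [hstepA, hstepB]
        refine ih rA hnd hval (fun k => ?_)
        rw [hC k, pvColIn_cons]
        by_cases hk : k = pvSec e
        · subst hk
          tauto
        · have : ¬ (pvTy e = "column" ∧ pvSec e = k) := fun hx => hk hx.2.symm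
          tauto
      · -- new column: both sides insert (pvSec e, "column")
        have hCsec : C.contains (pvSec e) = true :=
          (hC (pvSec e)).2 (Or.inl ⟨e, List.mem_cons_self, het, rfl⟩)
        have hstepA : pvStepA rA e = rA.insert (pvSec e) "column" := by
          simp [pvStepA, het, hg]
        have hstepB : pvStepB C (pvMapC C rA) e = pvMapC C (rA.insert (pvSec e) "column") := by
          rw [insert_mapC, pvStepB, if_pos hCsec, if_pos hCsec]
        rw [hstepA, hstepB]
        refine ih _ (PySem.Dict.nodup_keys_insert rA _ _ hnd) (fun p hp => ?_) (fun k => ?_)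
        · rcases (PySem.Dict.mem_items_insert rA _ _ p).1 hp with h | ⟨h, _⟩
          · exact Or.inl (by rw [h])
          · exact hval p h
        · rw [PySem.Dict.get?_insert, hC k, pvColIn_cons]
          by_cases hk : k = pvSec e
          · rw [if_pos hk]
            subst hk
            tauto
          · rw [if_neg hk]
            have : ¬ (pvTy e = "column" ∧ pvSec e = k) := fun hx => hk hx.2.symm
            tauto
    · by_cases hcont : rA.contains (pvSec e) = true
      · -- non-column element, section already present: A no-op, B re-inserts same value
        have hstepA : pvStepA rA e = rA := by simp [pvStepA, het, hcont]
        obtain ⟨v, hv⟩ : ∃ v, rA.get? (pvSec e) = some v := by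
          rw [PySem.Dict.contains_eq_isSome_get?] at hcont
          exact Option.isSome_iff_exists.1 hcont
        have hndB : (pvMapC C rA).keys.Nodup := by rw [keys_mapC]; exact hnd
        have hstepB : pvStepB C (pvMapC C rA) e = pvMapC C rA := by
          rw [pvStepB]
          by_cases hCs : C.contains (pvSec e) = true
          · rw [if_pos hCs]
            refine insert_eq_self_of_get? _ _ _ hndB ?_
            rw [get?_mapC, hv, Option.map_some, if_pos hCs]
          · rw [if_neg hCs]
            have hvb : v = "beam" := by
              rcases hval (pvSec e, v) (PySem.Dict.mem_items_of_get?_eq_some rA hv) with h | h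
              · have hcol : rA.get? (pvSec e) = some "column" := by
                  rw [hv]; exact congrArg some h
                exact absurd ((hC (pvSec e)).2 (Or.inr hcol)) hCs
              · exact h
            refine insert_eq_self_of_get? _ _ _ hndB ?_
            rw [get?_mapC, hv, Option.map_some, if_neg hCs, hvb]
        rw [hstepA, hstepB]
        refine ih rA hnd hval (fun k => ?_)
        rw [hC k, pvColIn_cons]
        have : ¬ (pvTy e = "column" ∧ pvSec e = k) := fun hx => het hx.1
        tauto
      · -- non-column element, fresh section: both sides insert the same "beam"/"column"
        have hstepA : pvStepA rA e = rA.insert (pvSec e) "beam" := by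
          simp [pvStepA, het, hcont]
        have hstepB : pvStepB C (pvMapC C rA) e = pvMapC C (rA.insert (pvSec e) "beam") := by
          rw [insert_mapC, pvStepB]
        rw [hstepA, hstepB]
        have hgnone : rA.get? (pvSec e) = none := by
          rw [PySem.Dict.contains_eq_isSome_get?] at hcont
          exact Option.not_isSome_iff_eq_none.1 (by simp [hcont])
        refine ih _ (PySem.Dict.nodup_keys_insert rA _ _ hnd) (fun p hp => ?_) (fun k => ?_)
        · rcases (PySem.Dict.mem_items_insert rA _ _ p).1 hp with h | ⟨h, _⟩
          · exact Or.inr (by rw [h])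
          · exact hval p h
        · rw [PySem.Dict.get?_insert, hC k, pvColIn_cons]
          have hne : ¬ (some ("beam" : String) = some "column") := by decide
          have hhd : ¬ (pvTy e = "column" ∧ pvSec e = k) := fun hx => het hx.1
          by_cases hk : k = pvSec e
          · rw [if_pos hk]
            subst hk
            rw [hgnone]
            have hno : ¬ ((none : Option String) = some "column") := by decide
            tauto
          · rw [if_neg hk]
            tauto

lemma pv_key (elems : List (List (String × String))) :
    (elems.foldl pvStepA (PySem.Dict.mk [])).items
      = (elems.foldl (pvStepB (elems.foldl pvStepC PySem.Set.empty)) (PySem.Dict.mk [])).items := by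
  have hC : ∀ k : String, ((elems.foldl pvStepC PySem.Set.empty).contains k = true)
      ↔ (pvColIn elems k ∨ (PySem.Dict.mk ([] : List (String × String))).get? k = some "column") := by
    intro k
    rw [pv_cols k elems PySem.Set.empty]
    have h1 : ¬ (PySem.Set.empty : PySem.Set String).contains k = true := by
      simp [PySem.Set.contains, PySem.Set.empty]
    have h2 : ¬ (PySem.Dict.mk ([] : List (String × String))).get? k = some "column" := by
      simp [PySem.Dict.get?]
    tauto
  have h := pv_main (elems.foldl pvStepC PySem.Set.empty) elems (PySem.Dict.mk [])
    List.nodup_nil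
    (fun p hp => absurd hp (List.not_mem_nil))
    hC
  rw [h]
  rfl

-- ===== VERDICT (by name: the statement is the Claim_ definition above) =====
theorem infer_section_roles_py_spec : Claim_equal_infer_section_roles_py := by
  intro data _
  show infer_section_roles_py data = infer_section_roles_py_alt data
  exact pv_key ((PySem.Dict.mk data).getD "elements" [])
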